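-- pv_equiv track=rewrite | github.com/Naman18055/CF-Solutions | Educational Round 94/E.py | rec
-- ===== SOURCE A (Python) =====
-- def rec(arr):
-- 	m = min(arr)
-- 	s = []
-- 	ans = m
-- 	for i in arr:
-- 		x = i-m
-- 		if x!=0:
-- 			s.append(x)
-- 		else:
-- 			if s:
-- 				ans += rec(s)
-- 				s = []
-- 	if s:
-- 		ans += rec(s)
-- 	return min(len(arr),ans)
-- ===== SOURCE B (Python) =====
-- def rec(arr):
--     return _solve(arr, 0)
--
-- def _solve(u, base):
--     # divide and conquer at the first position of the minimum, carrying the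
--     # base level instead of rebuilding subtracted lists
--     m = min(u)
--     p = u.index(m)
--     left, right = u[:p], u[p+1:]
--     res = m - base
--     if left:
--         res += _solve(left, m)
--     if right:
--         res += _solve(right, m)
--     return min(len(u), res)
-- ===== Notes on version B (the rewrite author's own statement) =====
-- stated objective: faster
-- what changed: Replaces A's subtract-min-then-rebuild-and-split scan (which allocates a new shifted copy of every segment at every recursion level) by a divide-and-conquer that splits at the first position of the minimum and carries the base level, so no shifted lists are ever built.
-- outside the precondition, e.g. on rec([]): A raises ValueError, B raises ValueError
import Mathlib
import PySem

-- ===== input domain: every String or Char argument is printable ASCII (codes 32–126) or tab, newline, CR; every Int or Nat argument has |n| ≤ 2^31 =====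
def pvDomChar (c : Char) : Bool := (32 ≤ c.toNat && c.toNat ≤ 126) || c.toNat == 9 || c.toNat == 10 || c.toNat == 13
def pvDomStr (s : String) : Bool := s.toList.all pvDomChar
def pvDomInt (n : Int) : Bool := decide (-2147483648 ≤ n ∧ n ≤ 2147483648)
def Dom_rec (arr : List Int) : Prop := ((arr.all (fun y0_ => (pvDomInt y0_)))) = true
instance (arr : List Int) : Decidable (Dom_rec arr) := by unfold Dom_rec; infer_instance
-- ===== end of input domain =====

-- B is an alternative algorithm: divide and conquer at the first minimum position carrying a
-- base level, instead of A's subtract-min rebuild-and-split scan; equivalence of return values.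

-- ===== PORT A =====
-- fuel = arr.length suffices: every recursive call is on a strictly shorter list
-- (proved in recF_fuel below); with fuel 0 the value is junk, never reached from `rec`.
def recF : Nat → List Int → Int
  | 0, _ => 0
  | f+1, arr =>
    match PySem.List.min? arr (fun y => y) with
    | none => 0                        -- Python: min([]) raises ValueError (outside Pre_)
    | some m =>
      let st := arr.foldl (fun (p : List Int × Int) i =>
          let x := i - m
          if x ≠ 0 then (p.1 ++ [x], p.2)
          else if p.1 ≠ [] then (([] : List Int), p.2 + recF f p.1)
          else p) (([] : List Int), m)
      let ans := if st.1 ≠ [] then st.2 + recF f st.1 else st.2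
      min (arr.length : Int) ans

def rec (arr : List Int) : Int := recF arr.length arr

-- ===== PORT B =====
-- fuel = u.length suffices: both recursive calls are on strictly shorter lists.
-- p = u.index(min u) is in range, so u[:p] / u[p+1:] are exactly take p / drop (p+1).
def solveF : Nat → List Int → Int → Int
  | 0, _, _ => 0
  | f+1, u, base =>
    match PySem.List.min? u (fun y => y) with
    | none => 0                        -- Python: min([]) raises (never reached: u nonempty)
    | some m =>
      match PySem.List.index? u m with
      | none => 0                      -- unreachable: m ∈ u
      | some p =>
        let left := u.take p
        let right := u.drop (p+1)
        let res := m - base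
        let res := if left ≠ [] then res + solveF f left m else res
        let res := if right ≠ [] then res + solveF f right m else res
        min (u.length : Int) res

def rec_alt (arr : List Int) : Int := solveF arr.length arr 0

-- ===== PRECONDITION & SPEC =====
-- Python A raises ValueError (min of empty sequence) on []; that is the only exception.
def Pre_rec (arr : List Int) : Prop := arr ≠ []
instance (arr : List Int) : Decidable (Pre_rec arr) := by unfold Pre_rec; infer_instance
def pvWitness_rec : List Int := [2, 1, 3]

def Spec_rec (arr : List Int) (out : Int) : Prop := out = rec_alt arr
instance (arr : List Int) (out : Int) : Decidable (Spec_rec arr out) := by unfold Spec_rec; infer_instance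

-- ===== CLAIM (what is proved, stated in full; the proofs are below) =====
def Claim_equal_rec : Prop := ∀ (arr : List Int), Dom_rec arr → Pre_rec arr → Spec_rec arr (rec arr)

-- ===== LEMMAS AND PROOFS =====

-- maximal nonzero runs ("segments") of a list, with `cur` the pending run
def segsW : List Int → List Int → List (List Int)
  | cur, [] => if cur = [] then [] else [cur]
  | cur, y :: ys =>
    if y ≠ 0 then segsW (cur ++ [y]) ys
    else if cur = [] then segsW [] ys else cur :: segsW [] ys

-- A's loop body, abstracted over the recursive call r
def stepR (r : List Int → Int) (p : List Int × Int) (y : Int) : List Int × Int :=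
  if y ≠ 0 then (p.1 ++ [y], p.2) else if p.1 ≠ [] then (([] : List Int), p.2 + r p.1) else p

theorem fold_segs (r : List Int → Int) (ys : List Int) : ∀ (cur : List Int) (a : Int),
    (let st := ys.foldl (stepR r) (cur, a);
     if st.1 ≠ [] then st.2 + r st.1 else st.2) = a + ((segsW cur ys).map r).sum := by
  induction ys with
  | nil => intro cur a; by_cases h : cur = [] <;> simp [segsW, h]
  | cons y ys ih =>
    intro cur a
    by_cases hy : y = 0
    · by_cases hc : cur = [] <;>
        simp [stepR, segsW, hy, hc, ih] <;> ring
    · simp [stepR, segsW, hy, ih]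

theorem recF_char (f : Nat) (arr : List Int) (m : Int)
    (h : PySem.List.min? arr (fun y => y) = some m) :
    recF (f+1) arr
      = min (arr.length : Int) (m + ((segsW [] (arr.map (· - m))).map (recF f)).sum) := by
  have hfold : arr.foldl (fun (p : List Int × Int) i =>
      let x := i - m
      if x ≠ 0 then (p.1 ++ [x], p.2)
      else if p.1 ≠ [] then (([] : List Int), p.2 + recF f p.1)
      else p) (([] : List Int), m)
      = (arr.map (· - m)).foldl (stepR (recF f)) (([] : List Int), m) := by
    rw [List.foldl_map]; rfl
  have := fold_segs (recF f) (arr.map (· - m)) [] m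
  simp only [recF, h, hfold]
  simp only at this
  rw [this]

theorem segsW_all_ne (ys : List Int) : ∀ (cur : List Int), (∀ y ∈ ys, y ≠ 0) →
    segsW cur ys = if cur ++ ys = [] then [] else [cur ++ ys] := by
  induction ys with
  | nil => intro cur _; by_cases h : cur = [] <;> simp [segsW, h]
  | cons y ys ih =>
    intro cur h
    have hy : y ≠ 0 := h y (by simp)
    have := ih (cur ++ [y]) (fun z hz => h z (by simp [hz]))
    simp [segsW, hy, this]

theorem segsW_append_zero (ys : List Int) : ∀ (cur zs : List Int),
    segsW cur (ys ++ 0 :: zs) = segsW cur ys ++ segsW [] zs := by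
  induction ys with
  | nil => intro cur zs; by_cases h : cur = [] <;> simp [segsW, h]
  | cons y ys ih =>
    intro cur zs
    by_cases hy : y = 0
    · by_cases hc : cur = [] <;> simp [segsW, hy, hc, ih]
    · simp [segsW, hy, ih]

theorem segsW_len (ys : List Int) : ∀ (cur : List Int),
    ((segsW cur ys).map List.length).sum = cur.length + ys.countP (fun y => y != 0) := by
  induction ys with
  | nil => intro cur; by_cases h : cur = [] <;> simp [segsW, h]
  | cons y ys ih =>
    intro cur
    by_cases hy : y = 0
    · by_cases hc : cur = [] <;> simp [segsW, hy, hc, ih]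
    · simp [segsW, hy, ih]
      omega

theorem recF_le (f : Nat) (xs : List Int) : recF f xs ≤ (xs.length : Int) := by
  cases f with
  | zero => simp [recF]
  | succ f =>
    cases h : PySem.List.min? xs (fun y => y) with
    | none => simp [recF, h]
    | some m => rw [recF_char f xs m h]; exact min_le_left _ _

-- the total segment length of a list containing a zero is < its length
theorem segs_len_lt (v : List Int) (h0 : (0 : Int) ∈ v) :
    ((segsW [] v).map List.length).sum < v.length := by
  have := segsW_len v []
  have hc : v.countP (fun y => y != 0) < v.length := by
    have hlt : v.countP (fun y => y != 0) ≠ v.length := by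
      intro hEq
      have := (List.countP_eq_length (p := fun y => y != 0) (l := v)).1 hEq 0 h0
      simp at this
    have hle : v.countP (fun y => y != 0) ≤ v.length := List.countP_le_length
    omega
  simp only [this]
  simpa using hc

theorem seg_len_lt (v g : List Int) (h0 : (0 : Int) ∈ v) (hg : g ∈ segsW [] v) :
    g.length < v.length := by
  have hmem : g.length ∈ (segsW [] v).map List.length := List.mem_map_of_mem hg
  have hle : g.length ≤ ((segsW [] v).map List.length).sum :=
    List.single_le_sum (by intro x _; exact Nat.zero_le x) _ hmem
  have := segs_len_lt v h0
  omega

theorem zero_mem_map_sub_min (xs : List Int) (m : Int)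
    (h : PySem.List.min? xs (fun y => y) = some m) : (0 : Int) ∈ xs.map (· - m) := by
  have hm : m ∈ xs := PySem.List.min?_mem h
  exact List.mem_map.2 ⟨m, hm, by ring⟩

theorem recF_fuel : ∀ (n : Nat) (xs : List Int) (f g : Nat),
    xs.length ≤ n → xs.length ≤ f → xs.length ≤ g → recF f xs = recF g xs := by
  intro n
  induction n with
  | zero =>
    intro xs f g h _ _
    have : xs = [] := List.eq_nil_of_length_eq_zero (Nat.le_zero.1 h)
    subst this
    cases f <;> cases g <;> simp [recF, PySem.List.min?]
  | succ n ih =>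
    intro xs f g hn hf hg
    rcases List.eq_nil_or_concat xs with hnil | _
    · subst hnil; cases f <;> cases g <;> simp [recF, PySem.List.min?]
    case inr hne =>
      have hlen : 1 ≤ xs.length := by
        rcases hne with ⟨l, a, rfl⟩; simp
      obtain ⟨f', rfl⟩ : ∃ f', f = f' + 1 := ⟨f - 1, by omega⟩
      obtain ⟨g', rfl⟩ : ∃ g', g = g' + 1 := ⟨g - 1, by omega⟩
      cases hmin : PySem.List.min? xs (fun y => y) with
      | none => simp [recF, hmin]
      | some m =>
        rw [recF_char f' xs m hmin, recF_char g' xs m hmin]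
        have h0 : (0 : Int) ∈ xs.map (· - m) := zero_mem_map_sub_min xs m hmin
        have hsum : ∀ h ∈ segsW [] (xs.map (· - m)), recF f' h = recF g' h := by
          intro h hh
          have hlt : h.length < xs.length := by
            have := seg_len_lt (xs.map (· - m)) h h0 hh
            simpa using this
          calc recF f' h = recF h.length h := ih h f' h.length (by omega) (by omega) (by omega)
            _ = recF g' h := ih h h.length g' (by omega) (by omega) (by omega)
        rw [List.map_congr_left hsum]

theorem rec_char (arr : List Int) (m : Int)
    (h : PySem.List.min? arr (fun y => y) = some m) :
    rec arr = min (arr.length : Int) (m + ((segsW [] (arr.map (· - m))).map rec).sum) := by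
  have hne : arr ≠ [] := by
    intro hnil; subst hnil; simp [PySem.List.min?] at h
  have hlen : 0 < arr.length := List.length_pos_iff.2 hne
  obtain ⟨n, hn⟩ : ∃ n, arr.length = n + 1 := ⟨arr.length - 1, by omega⟩
  have hrw : rec arr = recF (n + 1) arr := by unfold rec; rw [hn]
  rw [hrw, recF_char n arr m h, hn]
  have hmap : (segsW [] (arr.map (· - m))).map (recF n)
      = (segsW [] (arr.map (· - m))).map rec := by
    apply List.map_congr_left
    intro g hg
    have h0 : (0 : Int) ∈ arr.map (· - m) := zero_mem_map_sub_min arr m h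
    have hlt : g.length < arr.length := by
      have := seg_len_lt (arr.map (· - m)) g h0 hg
      simpa using this
    unfold rec
    exact recF_fuel g.length g n g.length (le_refl _) (by omega) (le_refl _)
  rw [hmap]

-- ===== B-side lemmas =====

theorem solveF_char (f : Nat) (u : List Int) (b m : Int) (p : Nat)
    (hmin : PySem.List.min? u (fun y => y) = some m)
    (hidx : PySem.List.index? u m = some p) :
    solveF (f+1) u b
      = min (u.length : Int)
          ((if u.take p ≠ [] then (m - b) + solveF f (u.take p) m else (m - b))
            + (if u.drop (p+1) ≠ [] then solveF f (u.drop (p+1)) m else 0)) := by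
  simp only [solveF, hmin, hidx]
  by_cases hl : u.take p = [] <;> by_cases hr : u.drop (p+1) = [] <;> simp [hl, hr]

theorem solveF_fuel : ∀ (n : Nat) (u : List Int) (b : Int) (f g : Nat),
    u.length ≤ n → u.length ≤ f → u.length ≤ g → solveF f u b = solveF g u b := by
  intro n
  induction n with
  | zero =>
    intro u b f g h _ _
    have : u = [] := List.eq_nil_of_length_eq_zero (Nat.le_zero.1 h)
    subst this
    cases f <;> cases g <;> simp [solveF, PySem.List.min?]
  | succ n ih =>
    intro u b f g hn hf hg
    rcases List.eq_nil_or_concat u with hnil | _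
    · subst hnil; cases f <;> cases g <;> simp [solveF, PySem.List.min?]
    case inr hne =>
      have hlen : 1 ≤ u.length := by rcases hne with ⟨l, a, rfl⟩; simp
      obtain ⟨f', rfl⟩ : ∃ f', f = f' + 1 := ⟨f - 1, by omega⟩
      obtain ⟨g', rfl⟩ : ∃ g', g = g' + 1 := ⟨g - 1, by omega⟩
      cases hmin : PySem.List.min? u (fun y => y) with
      | none => simp [solveF, hmin]
      | some m =>
        cases hidx : PySem.List.index? u m with
        | none =>
          rw [PySem.List.index?_eq_idxOf?] at hidx
          simp [solveF, hmin, hidx]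
        | some p =>
          obtain ⟨hp, _, _⟩ := PySem.List.getElem_of_index?_eq_some hidx
          have hl : (u.take p).length < u.length := by simp; omega
          have hr : (u.drop (p+1)).length < u.length := by simp; omega
          rw [solveF_char f' u b m p hmin hidx, solveF_char g' u b m p hmin hidx]
          have el : solveF f' (u.take p) m = solveF g' (u.take p) m := by
            calc solveF f' (u.take p) m = solveF (u.take p).length (u.take p) m :=
                  ih (u.take p) m f' _ (by omega) (by omega) (by omega)
              _ = solveF g' (u.take p) m := ih (u.take p) m _ g' (by omega) (by omega) (by omega)
          have er : solveF f' (u.drop (p+1)) m = solveF g' (u.drop (p+1)) m := by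
            calc solveF f' (u.drop (p+1)) m = solveF (u.drop (p+1)).length (u.drop (p+1)) m :=
                  ih _ m f' _ (by omega) (by omega) (by omega)
              _ = solveF g' (u.drop (p+1)) m := ih _ m _ g' (by omega) (by omega) (by omega)
          rw [el, er]

theorem foldl_min_sub (t : List Int) : ∀ (a b : Int),
    (t.map (· - b)).foldl min (a - b) = (t.foldl min a) - b := by
  induction t with
  | nil => intro a b; simp
  | cons y t ih =>
    intro a b
    simp only [List.map_cons, List.foldl_cons, min_sub_sub_right]
    exact ih (min a y) b

theorem min?_map_sub (u : List Int) (b m : Int)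
    (h : PySem.List.min? u (fun y => y) = some m) :
    PySem.List.min? (u.map (· - b)) (fun y => y) = some (m - b) := by
  cases u with
  | nil => simp [PySem.List.min?] at h
  | cons x t =>
    rw [PySem.List.min?_id_cons] at h
    simp only [List.map_cons]
    rw [PySem.List.min?_id_cons, foldl_min_sub]
    simp only [Option.some.injEq] at h ⊢
    omega

-- sum of rec over the segments of a nonneg list equals rec of the list
theorem sum_segs_le (v : List Int) :
    ((segsW [] v).map rec).sum ≤ (((segsW [] v).map List.length).sum : Int) := by
  have h1 : ((segsW [] v).map rec).sum ≤ ((segsW [] v).map (fun g => (g.length : Int))).sum :=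
    List.sum_le_sum (fun g _ => by unfold rec; exact recF_le g.length g)
  have h2 : ((segsW [] v).map (fun g => (g.length : Int))).sum
      = (((segsW [] v).map List.length).sum : Int) := by
    rw [Nat.cast_list_sum, List.map_map]; rfl
  rw [← h2]; exact h1

theorem sum_segs_eq (v : List Int) (hne : v ≠ []) (hnn : ∀ y ∈ v, (0 : Int) ≤ y) :
    ((segsW [] v).map rec).sum = rec v := by
  by_cases h0 : (0 : Int) ∈ v
  · cases hmin : PySem.List.min? v (fun y => y) with
    | none => exact absurd ((PySem.List.min?_eq_none_iff _ _).1 hmin) hne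
    | some mv =>
      have hm0 : mv = 0 := by
        have h1 : mv ≤ 0 := PySem.List.min?_isMin hmin 0 h0
        have h2 : (0 : Int) ≤ mv := hnn mv (PySem.List.min?_mem hmin)
        omega
      subst hm0
      have hchar := rec_char v 0 hmin
      have hv0 : v.map (· - (0 : Int)) = v := by simp
      rw [hv0] at hchar
      have hlt : ((segsW [] v).map rec).sum < (v.length : Int) := by
        have := sum_segs_le v
        have h3 := segs_len_lt v h0
        have : (((segsW [] v).map List.length).sum : Int) < (v.length : Int) := by
          exact_mod_cast h3
        have := sum_segs_le v
        omega
      rw [hchar, zero_add, min_eq_right hlt.le]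
  · have hall : ∀ y ∈ v, y ≠ 0 := fun y hy h => h0 (h ▸ hy)
    rw [segsW_all_ne v [] hall]
    simp [hne]

theorem main_lemma : ∀ (n : Nat) (u : List Int) (b : Int), u.length ≤ n → u ≠ [] →
    solveF u.length u b = rec (u.map (· - b)) := by
  intro n
  induction n with
  | zero =>
    intro u b hn hne
    exact absurd (List.eq_nil_of_length_eq_zero (Nat.le_zero.1 hn)) hne
  | succ n ih =>
    intro u b hn hne
    cases hmin : PySem.List.min? u (fun y => y) with
    | none => exact absurd ((PySem.List.min?_eq_none_iff _ _).1 hmin) hne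
    | some m =>
      have hmmem : m ∈ u := PySem.List.min?_mem hmin
      cases hidx : PySem.List.index? u m with
      | none =>
        rw [PySem.List.index?_eq_none_iff _ _] at hidx
        exact absurd hmmem hidx
      | some p =>
        obtain ⟨pre, suf, hu, hp, hmpre⟩ := (PySem.List.index?_eq_some_iff _ _ _).1 hidx
        have hlenu : u.length = p + 1 + suf.length := by
          rw [hu]; simp; omega
        have htake : u.take p = pre := by
          rw [hu, ← hp, List.take_left]
        have hdrop : u.drop (p+1) = suf := by
          have : pre ++ m :: suf = (pre ++ [m]) ++ suf := by simp
          rw [hu, this]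
          have h2 : p + 1 = (pre ++ [m]).length := by simp [← hp]
          rw [h2, List.drop_left]
        obtain ⟨k, hk⟩ : ∃ k, u.length = k + 1 := ⟨u.length - 1, by omega⟩
        -- A-side characterization of the right-hand side
        have hminT := min?_map_sub u b m hmin
        have hcharR := rec_char (u.map (· - b)) (m - b) hminT
        have hTT : (u.map (· - b)).map (· - (m - b)) = u.map (· - m) := by
          rw [List.map_map]
          apply List.map_congr_left
          intro x _
          simp only [Function.comp_apply]
          ring
        rw [hTT] at hcharR
        have hsplit : u.map (· - m) = pre.map (· - m) ++ 0 :: suf.map (· - m) := by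
          rw [hu]; simp
        have hsegs : segsW [] (u.map (· - m))
            = segsW [] (pre.map (· - m)) ++ segsW [] (suf.map (· - m)) := by
          rw [hsplit, segsW_append_zero]
        have hpreNZ : ∀ y ∈ pre.map (· - m), y ≠ 0 := by
          intro y hy
          obtain ⟨x, hx, rfl⟩ := List.mem_map.1 hy
          have hxm : x ≠ m := fun h => hmpre (h ▸ hx)
          have : m ≤ x := PySem.List.min?_isMin hmin x (by rw [hu]; simp [hx])
          omega
        have hsegsPre : segsW [] (pre.map (· - m))
            = if pre.map (· - m) = [] then [] else [pre.map (· - m)] := by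
          have := segsW_all_ne (pre.map (· - m)) [] hpreNZ
          simpa using this
        have hsufNN : ∀ y ∈ suf.map (· - m), (0 : Int) ≤ y := by
          intro y hy
          obtain ⟨x, hx, rfl⟩ := List.mem_map.1 hy
          have : m ≤ x := PySem.List.min?_isMin hmin x (by rw [hu]; simp [hx])
          omega
        -- B side: unfold one step of solveF
        rw [hk]
        rw [solveF_char k u b m p hmin hidx, htake, hdrop]
        rw [hcharR, hsegs, List.map_append, List.sum_append, hsegsPre]
        have hlenT : ((u.map (· - b)).length : Int) = (u.length : Int) := by simp
        rw [hlenT]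
        -- fuel adjustments and induction hypotheses
        by_cases hpre : pre = []
        · by_cases hsuf : suf = []
          · subst hpre; subst hsuf
            simp [segsW]
          · have hIHs : solveF k suf m = rec (suf.map (· - m)) := by
              rw [solveF_fuel suf.length suf m k suf.length (le_refl _) (by omega) (le_refl _)]
              exact ih suf m (by omega) hsuf
            have hsum : ((segsW [] (suf.map (· - m))).map rec).sum = rec (suf.map (· - m)) :=
              sum_segs_eq _ (by simp [hsuf]) hsufNN
            subst hpre
            simp [hsuf, hIHs, hsum]
        · have hIHp : solveF k pre m = rec (pre.map (· - m)) := by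
            rw [solveF_fuel pre.length pre m k pre.length (le_refl _) (by omega) (le_refl _)]
            exact ih pre m (by omega) hpre
          by_cases hsuf : suf = []
          · subst hsuf
            simp [segsW, hpre, hIHp]
          · have hIHs : solveF k suf m = rec (suf.map (· - m)) := by
              rw [solveF_fuel suf.length suf m k suf.length (le_refl _) (by omega) (le_refl _)]
              exact ih suf m (by omega) hsuf
            have hsum : ((segsW [] (suf.map (· - m))).map rec).sum = rec (suf.map (· - m)) :=
              sum_segs_eq _ (by simp [hsuf]) hsufNN
            simp [hpre, hsuf, hIHp, hIHs, hsum]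
            ring_nf

-- ===== VERDICT (by name: the statement is the Claim_ definition above) =====
theorem rec_spec : Claim_equal_rec := by
  intro arr _ hpre
  unfold Spec_rec rec_alt
  have := main_lemma arr.length arr 0 (le_refl _) hpre
  rw [this]
  have : arr.map (· - (0:Int)) = arr := by simp
  rw [this]
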